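-- pv_equiv track=rewrite | github.com/alvarodiez20/linkedin_games | linkedin_games/sudoku/solver.py | format_board
-- ===== SOURCE A (Python) =====
-- BOX_ROWS = 2
--
-- BOX_COLS = 3
--
-- def format_board(board: list[list[int]]) -> str:
--     """Format a 6×6 board as a multi-line string with sub-grid dividers.
--
--     Args:
--         board: The 6×6 grid to format.
--
--     Returns:
--         A human-readable string representation of *board*.
--     """
--     lines: list[str] = []
--     for i, row in enumerate(board):
--         if i > 0 and i % BOX_ROWS == 0:
--             lines.append("───────┼───────")
--         parts = []
--         for j, val in enumerate(row):
--             if j > 0 and j % BOX_COLS == 0: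
--                 parts.append("│")
--             parts.append(str(val) if val else "·")
--         lines.append(" ".join(parts))
--     return "\n".join(lines)
-- ===== SOURCE B (Python) =====
-- BOX_ROWS = 2
--
-- BOX_COLS = 3
--
-- DIVIDER = "───────┼───────"
--
--
-- def format_board(board: list[list[int]]) -> str:
--     """Format a 6×6 board as a multi-line string with sub-grid dividers."""
--     def fmt_row(row: list[int]) -> str:
--         chunks = [row[k:k + BOX_COLS] for k in range(0, len(row), BOX_COLS)]
--         return " │ ".join(" ".join(str(v) if v else "·" for v in chunk)
--                           for chunk in chunks)
--
--     lines = [fmt_row(row) for row in board]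
--     blocks = [lines[k:k + BOX_ROWS] for k in range(0, len(lines), BOX_ROWS)]
--     return ("\n" + DIVIDER + "\n").join("\n".join(block) for block in blocks)
-- ===== Notes on version B (the rewrite author's own statement) =====
-- stated objective: simpler
-- what changed: B drops A's enumerate/modular-counter separator insertion and instead slices each row into BOX_COLS-sized chunks and the row lines into BOX_ROWS-sized blocks, joining chunks with ' │ ' and blocks with the divider line.
import Mathlib
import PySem

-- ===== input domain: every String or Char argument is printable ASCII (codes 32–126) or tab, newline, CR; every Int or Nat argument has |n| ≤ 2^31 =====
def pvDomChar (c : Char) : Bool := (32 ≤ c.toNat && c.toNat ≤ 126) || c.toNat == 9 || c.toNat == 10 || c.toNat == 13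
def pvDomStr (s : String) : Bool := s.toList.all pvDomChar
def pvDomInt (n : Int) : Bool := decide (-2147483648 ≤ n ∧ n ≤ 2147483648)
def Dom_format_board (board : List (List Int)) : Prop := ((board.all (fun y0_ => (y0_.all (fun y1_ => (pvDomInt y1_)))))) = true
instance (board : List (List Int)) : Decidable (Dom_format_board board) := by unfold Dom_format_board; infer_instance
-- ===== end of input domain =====

-- B replaces A's modular index counters by explicit chunking: slice each row (and the list
-- of row lines) into sub-grid blocks and join the blocks with the separators; objective: simpler decomposition.

-- ===== PORT A =====
def format_board (board : List (List Int)) : String :=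
  let lines : List String := (PySem.List.enumerate board).foldl
    (fun lines p =>
      (if p.1 > 0 ∧ PySem.Int.mod p.1 2 = 0 then lines ++ ["───────┼───────"] else lines) ++
        [PySem.Str.join " "
          ((PySem.List.enumerate p.2).foldl
            (fun parts q =>
              (if q.1 > 0 ∧ PySem.Int.mod q.1 3 = 0 then parts ++ ["│"] else parts) ++
                [if q.2 ≠ 0 then PySem.Int.toStr q.2 else "·"]) [])]) []
  PySem.Str.join "\n" lines

-- ===== PORT B =====
-- Source B's `chunked(xs, n)` while-loop: peel off xs[:n], recurse on xs[n:]
def pvChunked {α : Type} (n : Nat) : List α → List (List α)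
  | [] => []
  | x :: rest => (x :: rest.take (n - 1)) :: pvChunked n (rest.drop (n - 1))
  termination_by xs => xs.length
  decreasing_by simp

def pvCell (v : Int) : String := if v ≠ 0 then PySem.Int.toStr v else "·"

def pvFmtRow (row : List Int) : String :=
  PySem.Str.join " │ " ((pvChunked 3 row).map (fun c => PySem.Str.join " " (c.map pvCell)))

def format_board_alt (board : List (List Int)) : String :=
  PySem.Str.join "\n───────┼───────\n"
    ((pvChunked 2 (board.map pvFmtRow)).map (fun b => PySem.Str.join "\n" b))

-- ===== PRECONDITION & SPEC =====
def Spec_format_board (board : List (List Int)) (out : String) : Prop := out = format_board_alt board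
instance (board : List (List Int)) (out : String) : Decidable (Spec_format_board board out) := by unfold Spec_format_board; infer_instance

-- ===== CLAIM (what is proved, stated in full; the proofs are below) =====
def Claim_equal_format_board : Prop := ∀ (board : List (List Int)), Dom_format_board board → Spec_format_board board (format_board board)

-- ===== LEMMAS AND PROOFS =====

-- the list of strings A's separator-inserting loop builds: chunks flattened with sep between
def pvJoinParts {α : Type} (sep : α) : List (List α) → List α
  | [] => []
  | c :: cs => c ++ cs.flatMap (fun c' => sep :: c')

lemma pvChunked_ne_nil {α : Type} (n : Nat) (xs : List α) :
    ∀ c ∈ pvChunked n xs, c ≠ [] := by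
  induction xs using pvChunked.induct n with
  | case1 => simp [pvChunked]
  | case2 x rest ih =>
      intro c hc
      rw [pvChunked] at hc
      rcases List.mem_cons.mp hc with h | h
      · simp [h]
      · exact ih c h

lemma pvChunked_map {α β : Type} (n : Nat) (f : α → β) (xs : List α) :
    pvChunked n (xs.map f) = (pvChunked n xs).map (List.map f) := by
  induction xs using pvChunked.induct n with
  | case1 => simp [pvChunked]
  | case2 x rest ih =>
      simp only [List.map_cons, pvChunked, List.map_take]
      congr 1
      rw [← List.map_drop, ih]

lemma pvJoinParts_map {α β : Type} (g : α → β) (sep : α) :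
    ∀ (cs : List (List α)), (pvJoinParts sep cs).map g = pvJoinParts (g sep) (cs.map (List.map g)) := by
  intro cs
  cases cs with
  | nil => simp [pvJoinParts]
  | cons c cs => simp [pvJoinParts, List.flatMap_map, List.map_flatMap]

lemma pv_join_append_cons (d : List Char) :
    ∀ (c : List (List Char)), c ≠ [] → ∀ (y : List Char) (rest : List (List Char)),
      PySem.Chars.join d (c ++ y :: rest) = PySem.Chars.join d c ++ d ++ PySem.Chars.join d (y :: rest) := by
  intro c
  induction c with
  | nil => simp
  | cons x c ih =>
      intro _ y rest
      cases c with
      | nil => simp [PySem.Chars.join_singleton, PySem.Chars.join_cons_cons]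
      | cons x' c' =>
          have ih' := ih (by simp) y rest
          simp only [List.cons_append] at ih' ⊢
          rw [PySem.Chars.join_cons_cons, ih', PySem.Chars.join_cons_cons]
          simp [List.append_assoc]

lemma pv_join_parts (d s : List Char) :
    ∀ (cs : List (List (List Char))), (∀ c ∈ cs, c ≠ []) →
      PySem.Chars.join d (pvJoinParts s cs)
        = PySem.Chars.join (d ++ s ++ d) (cs.map (PySem.Chars.join d)) := by
  intro cs
  induction cs with
  | nil => simp [pvJoinParts]
  | cons c cs ih =>
      intro h
      cases cs with
      | nil => simp [pvJoinParts, PySem.Chars.join_singleton]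
      | cons c₂ cs₂ =>
          have hc : c ≠ [] := h c (by simp)
          have hc₂ : c₂ ≠ [] := h c₂ (by simp)
          have hT : pvJoinParts s (c₂ :: cs₂) ≠ [] := by
            cases c₂ with
            | nil => exact absurd rfl hc₂
            | cons z zs => simp [pvJoinParts]
          have hstep : pvJoinParts s (c :: c₂ :: cs₂) = c ++ s :: pvJoinParts s (c₂ :: cs₂) := by
            simp [pvJoinParts]
          rw [hstep]
          obtain ⟨t, T', hT'⟩ : ∃ t T', pvJoinParts s (c₂ :: cs₂) = t :: T' :=
            match hx : pvJoinParts s (c₂ :: cs₂), hT with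
            | t :: T', _ => ⟨t, T', rfl⟩
          rw [pv_join_append_cons d c hc s (pvJoinParts s (c₂ :: cs₂)),
            hT', PySem.Chars.join_cons_cons, ← hT',
            ih (fun c hc => h c (by simp [hc]))]
          simp only [List.map_cons]
          rw [PySem.Chars.join_cons_cons]
          simp [List.append_assoc]

lemma pv_gfold_pos {α : Type} (n : Nat) (hn : 1 < n) (sep : String) (f : α → String) :
    ∀ (xs : List α) (m : Nat) (acc : List String), 0 < m →
      (PySem.List.enumerate xs (m : Int)).foldl
        (fun acc q =>
          (if q.1 > 0 ∧ PySem.Int.mod q.1 (n : Int) = 0 then acc ++ [sep] else acc) ++ [f q.2]) acc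
      = (if m % n = 0 then acc ++ (pvChunked n xs).flatMap (fun c => sep :: c.map f)
         else acc ++ ((xs.take (n - m % n)).map f)
             ++ (pvChunked n (xs.drop (n - m % n))).flatMap (fun c => sep :: c.map f)) := by
  intro xs
  induction xs with
  | nil =>
      intro m acc hm
      rw [PySem.List.enumerate_nil]
      split <;> simp [pvChunked]
  | cons x rest ih =>
      intro m acc hm
      rw [PySem.List.enumerate_cons, List.foldl_cons]
      have hmpos : (0 : Int) < (m : Int) := by exact_mod_cast hm
      have hmod : PySem.Int.mod (m : Int) (n : Int) = ((m % n : Nat) : Int) :=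
        PySem.Int.mod_natCast m n
      have hcast : (m : Int) + 1 = ((m + 1 : Nat) : Int) := by push_cast; ring
      rw [hcast, ih (m + 1) _ (Nat.succ_pos m)]
      by_cases hr : m % n = 0
      · have h1 : (m + 1) % n = 1 := by
          rw [Nat.add_mod, hr, Nat.mod_eq_of_lt hn]
          simp [Nat.mod_eq_of_lt hn]
        simp [hm, h1, hr, pvChunked, List.append_assoc]
      · have hrlt : m % n < n := Nat.mod_lt m (by omega)
        have hnd : ¬((n : Int) ∣ (m : Int)) := by
          rw [Int.natCast_dvd_natCast]
          rintro ⟨k, rfl⟩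
          exact hr (Nat.mul_mod_right n k)
        by_cases h2 : m % n + 1 = n
        · have h1 : (m + 1) % n = 0 := by
            rw [Nat.add_mod, Nat.mod_eq_of_lt hn, h2]
            exact Nat.mod_self n
          have ht : n - m % n = 1 := by omega
          simp [h1, hr, ht, List.append_assoc]
          exact fun _ => hnd
        · have h1 : (m + 1) % n = m % n + 1 := by
            rw [Nat.add_mod, Nat.mod_eq_of_lt hn]
            exact Nat.mod_eq_of_lt (by omega)
          have ht : n - m % n = (n - (m % n + 1)) + 1 := by omega
          simp [h1, hr, ht, List.take_succ_cons, List.drop_succ_cons,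
            List.append_assoc]
          exact fun _ => hnd

lemma pv_gfold_zero {α : Type} (n : Nat) (hn : 1 < n) (sep : String) (f : α → String)
    (xs : List α) :
    (PySem.List.enumerate xs).foldl
      (fun acc q =>
        (if q.1 > 0 ∧ PySem.Int.mod q.1 (n : Int) = 0 then acc ++ [sep] else acc) ++ [f q.2]) []
    = pvJoinParts sep ((pvChunked n xs).map (List.map f)) := by
  cases xs with
  | nil => simp [PySem.List.enumerate_nil, pvChunked, pvJoinParts]
  | cons x rest =>
      rw [PySem.List.enumerate_cons, List.foldl_cons]
      rw [show (0 : Int) + 1 = ((1 : Nat) : Int) from by norm_num]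
      rw [pv_gfold_pos n hn sep f rest 1 _ Nat.one_pos]
      have h1 : 1 % n = 1 := Nat.mod_eq_of_lt hn
      simp [h1, pvChunked, pvJoinParts, List.flatMap_map]

lemma pv_str_join_parts (d s bigsep : String) (hb : bigsep.toList = d.toList ++ s.toList ++ d.toList)
    (cs : List (List String)) (hne : ∀ c ∈ cs, c ≠ []) :
    PySem.Str.join d (pvJoinParts s cs) = PySem.Str.join bigsep (cs.map (fun b => PySem.Str.join d b)) := by
  apply String.ext
  rw [PySem.Str.toList_join, PySem.Str.toList_join,
    pvJoinParts_map String.toList s cs,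
    pv_join_parts d.toList s.toList (cs.map (List.map String.toList)) (by
      intro c hc
      obtain ⟨c₀, h₀, rfl⟩ := List.mem_map.mp hc
      simpa using hne c₀ h₀),
    hb]
  simp [List.map_map, Function.comp_def, PySem.Str.toList_join]

lemma pv_row_eq (row : List Int) :
    PySem.Str.join " "
      ((PySem.List.enumerate row).foldl
        (fun parts q =>
          (if q.1 > 0 ∧ PySem.Int.mod q.1 3 = 0 then parts ++ ["│"] else parts) ++
            [if q.2 ≠ 0 then PySem.Int.toStr q.2 else "·"]) [])
    = pvFmtRow row := by
  have h := pv_gfold_zero 3 (by norm_num) "│"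
    (fun v : Int => if v ≠ 0 then PySem.Int.toStr v else "·") row
  simp only [Nat.cast_ofNat] at h
  have hc : (fun v : Int => if v ≠ 0 then PySem.Int.toStr v else "·") = pvCell := rfl
  rw [hc] at h
  rw [h]
  have hne : ∀ c ∈ (pvChunked 3 row).map (List.map pvCell), c ≠ [] := by
    intro c hcm
    obtain ⟨c₀, h₀, rfl⟩ := List.mem_map.mp hcm
    simpa using pvChunked_ne_nil 3 row c₀ h₀
  rw [pv_str_join_parts " " "│" " │ " (by decide) _ hne, pvFmtRow]
  simp [List.map_map, Function.comp_def]

-- ===== VERDICT (by name: the statement is the Claim_ definition above) =====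
theorem format_board_spec : Claim_equal_format_board := by
  intro board _
  show format_board board = format_board_alt board
  simp only [format_board, format_board_alt]
  have hrow : (fun (lines : List String) (p : Int × List Int) =>
      (if p.1 > 0 ∧ PySem.Int.mod p.1 2 = 0 then lines ++ ["───────┼───────"] else lines) ++
        [PySem.Str.join " "
          ((PySem.List.enumerate p.2).foldl
            (fun parts q =>
              (if q.1 > 0 ∧ PySem.Int.mod q.1 3 = 0 then parts ++ ["│"] else parts) ++
                [if q.2 ≠ 0 then PySem.Int.toStr q.2 else "·"]) [])])
      = (fun lines p =>
          (if p.1 > 0 ∧ PySem.Int.mod p.1 2 = 0 then lines ++ ["───────┼───────"] else lines) ++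
            [pvFmtRow p.2]) := by
    funext lines p
    rw [pv_row_eq]
  rw [hrow]
  have h2 := pv_gfold_zero 2 (by norm_num) "───────┼───────" pvFmtRow board
  simp only [Nat.cast_ofNat] at h2
  rw [h2, ← pvChunked_map]
  exact pv_str_join_parts "\n" "───────┼───────" "\n───────┼───────\n" (by decide) _
    (pvChunked_ne_nil 2 _)
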